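-- pv_equiv track=rewrite | github.com/ch-anuj/Distributed-Virtual-Stock-Market-Simulation | test_adv_supply_demand.py | getMatchOrder
-- ===== SOURCE A (Python) =====
-- def getMatchOrder(askList,bidList,currP):
--     list2 = []
--     if askList != None and bidList != None:
--         list2 = list(set(askList).intersection(bidList))
--     matchList = []
--     if list2 != None:
--         for k in list2:
--             matchList.append(currP + k)
--     matchList.sort()
--     return matchList
-- ===== SOURCE B (Python) =====
-- def getMatchOrder(askList, bidList, currP):
--     if askList is None or bidList is None:
--         return []
--     a = sorted(askList)
--     b = sorted(bidList)
--     res = []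
--     i = 0
--     j = 0
--     while i < len(a) and j < len(b):
--         if a[i] < b[j]:
--             i += 1
--         elif b[j] < a[i]:
--             j += 1
--         else:
--             v = a[i]
--             res.append(currP + v)
--             while i < len(a) and a[i] == v:
--                 i += 1
--             while j < len(b) and b[j] == v:
--                 j += 1
--     return res
-- ===== Notes on version B (the rewrite author's own statement) =====
-- stated objective: alternative
-- what changed: Replaces the hash-set intersection followed by a final sort with a sort-then-merge two-pointer intersection that skips duplicate runs, emitting currP+v in increasing order so no trailing sort is needed.
import Mathlib
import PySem

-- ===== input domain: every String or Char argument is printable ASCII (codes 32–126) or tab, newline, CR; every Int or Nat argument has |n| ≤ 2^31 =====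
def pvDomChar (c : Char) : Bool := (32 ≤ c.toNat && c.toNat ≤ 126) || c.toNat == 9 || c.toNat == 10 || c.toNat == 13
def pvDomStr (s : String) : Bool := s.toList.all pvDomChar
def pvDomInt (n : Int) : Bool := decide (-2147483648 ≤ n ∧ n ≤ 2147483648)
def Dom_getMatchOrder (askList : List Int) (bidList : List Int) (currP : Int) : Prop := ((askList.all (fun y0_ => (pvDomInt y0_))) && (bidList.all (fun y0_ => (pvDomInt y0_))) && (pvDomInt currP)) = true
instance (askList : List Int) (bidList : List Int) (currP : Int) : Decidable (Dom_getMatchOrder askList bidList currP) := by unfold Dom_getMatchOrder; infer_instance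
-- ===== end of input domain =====

-- B replaces A's hash-set intersection + trailing sort by a sort-then-merge two-pointer
-- intersection that skips duplicate runs (alternative decomposition, same result).

-- ===== PORT A =====
-- In the typed Lean setting the arguments are lists, so A's `!= None` guards are always true.
def getMatchOrder (askList : List Int) (bidList : List Int) (currP : Int) : List Int :=
  let list2 : List Int := PySem.Set.inter (PySem.Set.ofList askList) bidList
  let matchList : List Int := list2.foldl (fun acc k => acc ++ [currP + k]) []
  PySem.List.sorted matchList (fun x => x) false

-- ===== PORT B =====
-- the while loop of Source B: walk both sorted lists, on a match emit currP+v and skip the runs of v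
def pvMergeInter (currP : Int) : List Int → List Int → List Int
  | [], _ => []
  | _ :: _, [] => []
  | x :: xs, y :: ys =>
    if x < y then pvMergeInter currP xs (y :: ys)
    else if y < x then pvMergeInter currP (x :: xs) ys
    else (currP + x) :: pvMergeInter currP (xs.dropWhile (fun t => t == x)) (ys.dropWhile (fun t => t == x))
termination_by as bs => as.length + bs.length
decreasing_by
  all_goals
    have h1 := List.length_dropWhile_le (fun t => t == x) xs
    have h2 := List.length_dropWhile_le (fun t => t == x) ys
    simp at *
    try omega

def getMatchOrder_alt (askList : List Int) (bidList : List Int) (currP : Int) : List Int :=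
  pvMergeInter currP (PySem.List.sorted askList (fun x => x) false)
                     (PySem.List.sorted bidList (fun x => x) false)

-- ===== PRECONDITION & SPEC =====
def Spec_getMatchOrder (askList : List Int) (bidList : List Int) (currP : Int) (out : List Int) : Prop := out = getMatchOrder_alt askList bidList currP
instance (askList : List Int) (bidList : List Int) (currP : Int) (out : List Int) : Decidable (Spec_getMatchOrder askList bidList currP out) := by unfold Spec_getMatchOrder; infer_instance

-- ===== CLAIM (what is proved, stated in full; the proofs are below) =====
def Claim_equal_getMatchOrder : Prop := ∀ (askList : List Int) (bidList : List Int) (currP : Int), Dom_getMatchOrder askList bidList currP → Spec_getMatchOrder askList bidList currP (getMatchOrder askList bidList currP)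

-- ===== LEMMAS AND PROOFS =====

-- the intersection values collected by the merge walk, without the +currP
def inter2 : List Int → List Int → List Int
  | [], _ => []
  | _ :: _, [] => []
  | x :: xs, y :: ys =>
    if x < y then inter2 xs (y :: ys)
    else if y < x then inter2 (x :: xs) ys
    else x :: inter2 (xs.dropWhile (fun t => t == x)) (ys.dropWhile (fun t => t == x))
termination_by as bs => as.length + bs.length
decreasing_by
  all_goals
    have h1 := List.length_dropWhile_le (fun t => t == x) xs
    have h2 := List.length_dropWhile_le (fun t => t == x) ys
    simp at *
    try omega

theorem pvMergeInter_cons (c x y : Int) (xs ys : List Int) :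
    pvMergeInter c (x :: xs) (y :: ys) =
      if x < y then pvMergeInter c xs (y :: ys)
      else if y < x then pvMergeInter c (x :: xs) ys
      else (c + x) :: pvMergeInter c (xs.dropWhile (fun t => t == x)) (ys.dropWhile (fun t => t == x)) := by
  rw [pvMergeInter.eq_def]

theorem pvMergeInter_eq_map (c : Int) (as bs : List Int) :
    pvMergeInter c as bs = (inter2 as bs).map (fun v => c + v) := by
  fun_induction inter2 as bs with
  | case1 bs => simp [pvMergeInter]
  | case2 x xs => simp [pvMergeInter]
  | case3 x xs y ys h ih => rw [pvMergeInter_cons]; simp [h, ih]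
  | case4 x xs y ys h h2 ih => rw [pvMergeInter_cons]; simp [h, h2, ih]
  | case5 x xs y ys h h2 ih => rw [pvMergeInter_cons]; simp [h, h2, ih]

theorem mem_inter2_sub (as bs : List Int) : ∀ v ∈ inter2 as bs, v ∈ as ∧ v ∈ bs := by
  fun_induction inter2 as bs with
  | case1 bs => simp
  | case2 x xs => simp
  | case3 x xs y ys h ih =>
    intro v hv
    have := ih v hv
    exact ⟨List.mem_cons_of_mem _ this.1, this.2⟩
  | case4 x xs y ys h h2 ih =>
    intro v hv
    have := ih v hv
    exact ⟨this.1, List.mem_cons_of_mem _ this.2⟩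
  | case5 x xs y ys h h2 ih =>
    have hxy : x = y := by omega
    intro v hv
    rcases List.mem_cons.1 hv with rfl | hv
    · exact ⟨List.mem_cons_self, hxy ▸ List.mem_cons_self⟩
    · have := ih v hv
      exact ⟨List.mem_cons_of_mem _ ((List.dropWhile_sublist _).mem this.1),
             List.mem_cons_of_mem _ ((List.dropWhile_sublist _).mem this.2)⟩

theorem mem_dropWhile_of_ne {x v : Int} {xs : List Int} (hv : v ∈ xs) (hne : v ≠ x) :
    v ∈ xs.dropWhile (fun t => t == x) := by
  rw [← List.takeWhile_append_dropWhile (p := fun t => t == x) (l := xs)] at hv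
  rcases List.mem_append.1 hv with h | h
  · have := List.mem_takeWhile_imp h
    simp at this; omega
  · exact h

theorem gt_of_mem_dropWhile {x : Int} {xs : List Int} (hs : xs.Pairwise (· ≤ ·))
    (hge : ∀ v ∈ xs, x ≤ v) : ∀ v ∈ xs.dropWhile (fun t => t == x), x < v := by
  induction xs with
  | nil => simp
  | cons z zs ih =>
    rw [List.dropWhile_cons]
    by_cases hz : z = x
    · simp only [hz, beq_self_eq_true, if_pos]
      exact ih (List.pairwise_cons.1 hs).2
        (fun v hv => le_trans (hz ▸ (List.pairwise_cons.1 hs).1 v hv) (le_refl _))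
    · simp only [beq_iff_eq, hz, if_false]
      intro v hv
      rcases List.mem_cons.1 hv with rfl | hv
      · have := hge v List.mem_cons_self; omega
      · have hzx : x < z := lt_of_le_of_ne (hge z List.mem_cons_self) (Ne.symm hz)
        exact lt_of_lt_of_le hzx ((List.pairwise_cons.1 hs).1 v hv)

theorem mem_inter2 (as bs : List Int) (ha : as.Pairwise (· ≤ ·)) (hb : bs.Pairwise (· ≤ ·)) :
    ∀ v, v ∈ inter2 as bs ↔ (v ∈ as ∧ v ∈ bs) := by
  fun_induction inter2 as bs with
  | case1 bs => simp
  | case2 x xs => simp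
  | case3 x xs y ys h ih =>
    intro v
    rw [ih (List.pairwise_cons.1 ha).2 hb]
    constructor
    · exact fun ⟨h1, h2⟩ => ⟨List.mem_cons_of_mem _ h1, h2⟩
    · rintro ⟨h1, h2⟩
      rcases List.mem_cons.1 h1 with rfl | h1
      · exfalso
        rcases List.mem_cons.1 h2 with rfl | h2
        · omega
        · have := (List.pairwise_cons.1 hb).1 v h2; omega
      · exact ⟨h1, h2⟩
  | case4 x xs y ys h h2 ih =>
    intro v
    rw [ih ha (List.pairwise_cons.1 hb).2]
    constructor
    · exact fun ⟨h1, h3⟩ => ⟨h1, List.mem_cons_of_mem _ h3⟩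
    · rintro ⟨h1, h3⟩
      rcases List.mem_cons.1 h3 with rfl | h3
      · exfalso
        rcases List.mem_cons.1 h1 with rfl | h1
        · omega
        · have := (List.pairwise_cons.1 ha).1 v h1; omega
      · exact ⟨h1, h3⟩
  | case5 x xs y ys h h2 ih =>
    intro v
    have hxy : x = y := by omega
    subst hxy
    rw [List.mem_cons,
        ih ((List.pairwise_cons.1 ha).2.sublist (List.dropWhile_sublist _))
           ((List.pairwise_cons.1 hb).2.sublist (List.dropWhile_sublist _))]
    constructor
    · rintro (rfl | ⟨h1, h3⟩)
      · exact ⟨List.mem_cons_self, List.mem_cons_self⟩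
      · exact ⟨List.mem_cons_of_mem _ ((List.dropWhile_sublist _).mem h1),
               List.mem_cons_of_mem _ ((List.dropWhile_sublist _).mem h3)⟩
    · rintro ⟨h1, h3⟩
      by_cases hvx : v = x
      · exact Or.inl hvx
      · right
        rcases List.mem_cons.1 h1 with rfl | h1
        · exact absurd rfl hvx
        rcases List.mem_cons.1 h3 with rfl | h3
        · exact absurd rfl hvx
        exact ⟨mem_dropWhile_of_ne h1 hvx, mem_dropWhile_of_ne h3 hvx⟩

theorem pairwise_lt_inter2 (as bs : List Int) (ha : as.Pairwise (· ≤ ·))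
    (hb : bs.Pairwise (· ≤ ·)) : (inter2 as bs).Pairwise (· < ·) := by
  fun_induction inter2 as bs with
  | case1 bs => simp
  | case2 x xs => simp
  | case3 x xs y ys h ih =>
    exact ih (List.pairwise_cons.1 ha).2 hb
  | case4 x xs y ys h h2 ih =>
    exact ih ha (List.pairwise_cons.1 hb).2
  | case5 x xs y ys h h2 ih =>
    have hxs := (List.pairwise_cons.1 ha).2.sublist (List.dropWhile_sublist (fun t => t == x) (l := xs))
    have hys := (List.pairwise_cons.1 hb).2.sublist (List.dropWhile_sublist (fun t => t == x) (l := ys))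
    refine List.pairwise_cons.2 ⟨?_, ih hxs hys⟩
    intro v hv
    have hmem := (mem_inter2_sub _ _ v hv).1
    exact gt_of_mem_dropWhile (List.pairwise_cons.1 ha).2 (List.pairwise_cons.1 ha).1 v hmem

theorem foldl_append_map (f : Int → Int) (l : List Int) :
    ∀ init : List Int, l.foldl (fun acc k => acc ++ [f k]) init = init ++ l.map f := by
  induction l with
  | nil => simp
  | cons x xs ih => intro init; simp [List.foldl_cons, ih]

-- ===== VERDICT (by name: the statement is the Claim_ definition above) =====
theorem getMatchOrder_spec : Claim_equal_getMatchOrder := by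
  intro askList bidList currP _
  simp only [Spec_getMatchOrder, getMatchOrder, getMatchOrder_alt]
  set sa := PySem.List.sorted askList (fun x => x) false with hsa
  set sb := PySem.List.sorted bidList (fun x => x) false with hsb
  have hpa : sa.Pairwise (· ≤ ·) := by
    have := PySem.List.sorted_pairwise askList (fun x => x)
    simpa [hsa] using this
  have hpb : sb.Pairwise (· ≤ ·) := by
    have := PySem.List.sorted_pairwise bidList (fun x => x)
    simpa [hsb] using this
  set S : List Int := PySem.Set.inter (PySem.Set.ofList askList) bidList with hS
  set I : List Int := inter2 sa sb with hI
  have hIperm : I.Perm S := by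
    rw [List.perm_ext_iff_of_nodup
      ((pairwise_lt_inter2 sa sb hpa hpb).imp (fun h => ne_of_lt h))
      (PySem.Set.nodup_inter _ _ (PySem.Set.nodup_ofList askList))]
    intro v
    rw [mem_inter2 sa sb hpa hpb v, PySem.Set.mem_inter, PySem.Set.mem_ofList]
    simp only [hsa, hsb, PySem.List.mem_sorted]
  rw [pvMergeInter_eq_map, foldl_append_map, List.nil_append]
  have hpw : (I.map (fun v => currP + v)).Pairwise (· < ·) :=
    List.Pairwise.map _ (fun a b hab => by omega) (pairwise_lt_inter2 sa sb hpa hpb)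
  exact PySem.List.sorted_eq_of_perm_of_pairwise_lt _ _ _ (hIperm.map (fun v => currP + v)) hpw
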